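-- pv_equiv track=rewrite | github.com/voxel51/voxelgpt | links/docs_query_dispatcher.py | _remove_markdown_header
-- ===== SOURCE A (Python) =====
-- def _remove_markdown_header(page_md):
--     md_lines = page_md.split("\n")
--
--     body_lines = []
--     in_body = False
--     for mdl in md_lines:
--         if len(mdl) > 0 and mdl[0] == "#":
--             in_body = True
--         if in_body:
--             body_lines.append(mdl)
--     page_md = "\n".join(body_lines)
--     return page_md
-- ===== SOURCE B (Python) =====
-- def _remove_markdown_header(page_md):
--     lines = page_md.split("\n")
--     for i, line in enumerate(lines):
--         if line.startswith("#"):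
--             return "\n".join(lines[i:])
--     return ""
-- ===== Notes on version B (the rewrite author's own statement) =====
-- stated objective: simpler
-- what changed: Replaces A's boolean-flag accumulation loop (appending every line once the flag flips) with a locate-then-slice decomposition: find the first header line and join the remaining suffix, yielding the empty string when no header line exists.
import Mathlib
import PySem

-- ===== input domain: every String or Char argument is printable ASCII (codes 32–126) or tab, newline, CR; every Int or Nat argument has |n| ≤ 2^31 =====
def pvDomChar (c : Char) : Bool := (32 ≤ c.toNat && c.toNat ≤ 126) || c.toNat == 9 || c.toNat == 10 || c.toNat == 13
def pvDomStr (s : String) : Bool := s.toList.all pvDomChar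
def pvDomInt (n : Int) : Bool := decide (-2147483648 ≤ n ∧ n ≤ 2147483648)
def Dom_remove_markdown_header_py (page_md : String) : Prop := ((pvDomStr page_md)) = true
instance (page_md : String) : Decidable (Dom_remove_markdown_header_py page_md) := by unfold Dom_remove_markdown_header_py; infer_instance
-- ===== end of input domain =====

-- B replaces A's boolean-flag accumulation loop with a locate-then-slice decomposition
-- (find the first '#' line, join the remaining suffix); objective: simpler.


-- ===== PORT A =====
-- the sep literal "\n" is never "", so split? is always some
-- `mdl[0] == "#"` compares one-character strings; exact as equality with the char '#'
def remove_markdown_header_py (page_md : String) : String :=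
  let md_lines := (PySem.Str.split? page_md "\n").getD []
  let st := md_lines.foldl
    (fun (st : List String × Bool) mdl =>
      let in_body := if PySem.Str.len mdl > 0 ∧ PySem.Str.pyGet? mdl 0 = some '#' then true else st.2
      (if in_body then st.1 ++ [mdl] else st.1, in_body))
    ([], false)
  PySem.Str.join "\n" st.1

-- ===== PORT B =====
-- B's for-loop over enumerate(lines): walk the suffixes; at the first line starting
-- with "#" return '\n'.join of the current suffix (= lines[i:]), else "".
def pvFindHeaderSuffix : List String → String
  | [] => ""
  | l :: rest =>
      if PySem.Str.startswith l "#" then PySem.Str.join "\n" (l :: rest)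
      else pvFindHeaderSuffix rest

def remove_markdown_header_py_alt (page_md : String) : String :=
  pvFindHeaderSuffix ((PySem.Str.split? page_md "\n").getD [])

-- ===== PRECONDITION & SPEC =====
def Spec_remove_markdown_header_py (page_md : String) (out : String) : Prop := out = remove_markdown_header_py_alt page_md
instance (page_md : String) (out : String) : Decidable (Spec_remove_markdown_header_py page_md out) := by unfold Spec_remove_markdown_header_py; infer_instance

-- ===== CLAIM (what is proved, stated in full; the proofs are below) =====
def Claim_equal_remove_markdown_header_py : Prop := ∀ (page_md : String), Dom_remove_markdown_header_py page_md → Spec_remove_markdown_header_py page_md (remove_markdown_header_py page_md)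

-- ===== LEMMAS AND PROOFS =====

-- A's header test (len > 0 and first char '#') is B's startswith "#"
theorem pv_cond_eq (l : String) :
    (PySem.Str.len l > 0 ∧ PySem.Str.pyGet? l 0 = some '#') ↔ PySem.Str.startswith l "#" = true := by
  simp only [pysem]
  generalize l.toList = cs
  cases cs with
  | nil => simp
  | cons c rest => simp [eq_comm]

-- once in_body is true, A's loop appends every remaining line
theorem pv_foldl_true (ls : List String) (acc : List String) :
    ls.foldl
      (fun (st : List String × Bool) mdl =>
        let in_body := if PySem.Str.len mdl > 0 ∧ PySem.Str.pyGet? mdl 0 = some '#' then true else st.2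
        (if in_body then st.1 ++ [mdl] else st.1, in_body))
      (acc, true) = (acc ++ ls, true) := by
  induction ls generalizing acc with
  | nil => simp
  | cons l rest ih => simp only [List.foldl_cons, if_pos, ite_self]; rw [ih]; simp

theorem pv_main (ls : List String) :
    PySem.Str.join "\n"
      (ls.foldl
        (fun (st : List String × Bool) mdl =>
          let in_body := if PySem.Str.len mdl > 0 ∧ PySem.Str.pyGet? mdl 0 = some '#' then true else st.2
          (if in_body then st.1 ++ [mdl] else st.1, in_body))
        ([], false)).1 = pvFindHeaderSuffix ls := by
  induction ls with
  | nil => rfl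
  | cons l rest ih =>
      by_cases h : PySem.Str.startswith l "#" = true
      · have hc := (pv_cond_eq l).mpr h
        simp only [List.foldl_cons, if_pos hc, pvFindHeaderSuffix, h, if_pos]
        rw [pv_foldl_true]
        simp
      · have hc : ¬ (PySem.Str.len l > 0 ∧ PySem.Str.pyGet? l 0 = some '#') :=
          fun hcc => h ((pv_cond_eq l).mp hcc)
        rw [pvFindHeaderSuffix, if_neg h, List.foldl_cons]
        show PySem.Str.join "\n" (List.foldl _
          ((if (if _ then true else false) = true then [] ++ [l] else []), (if _ then true else false)) rest).1 = _
        rw [if_neg hc]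
        simpa using ih

-- ===== VERDICT (by name: the statement is the Claim_ definition above) =====
theorem remove_markdown_header_py_spec : Claim_equal_remove_markdown_header_py := by
  intro page_md _
  show _ = _
  simp only [remove_markdown_header_py, remove_markdown_header_py_alt]
  exact pv_main _
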